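-- pv_equiv track=rewrite | github.com/haochiz/PhenoPad-medterm-evaluation | run.py | count_correct_session
-- ===== SOURCE A (Python) =====
-- def count_correct_session(ref_terms, hyp_terms):
--     ref_terms = list(set(ref_terms))
--     hyp_terms = list(set(hyp_terms))
--     true_positive = 0
--     false_postive = 0
--     for term in hyp_terms:
--         if term in ref_terms:
--             true_positive += 1
--         else:
--             false_postive += 1
--
--     return true_positive, false_postive, len(ref_terms)
-- ===== SOURCE B (Python) =====
-- def count_correct_session(ref_terms, hyp_terms):
--     r = set(ref_terms)
--     h = set(hyp_terms)
--     return len(h & r), len(h - r), len(r)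
-- ===== Notes on version B (the rewrite author's own statement) =====
-- stated objective: faster
-- what changed: Replaces the dedup-then-loop-with-linear-list-membership counting by set intersection/difference cardinalities: tp = |hyp & ref|, fp = |hyp - ref|.
import Mathlib
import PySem

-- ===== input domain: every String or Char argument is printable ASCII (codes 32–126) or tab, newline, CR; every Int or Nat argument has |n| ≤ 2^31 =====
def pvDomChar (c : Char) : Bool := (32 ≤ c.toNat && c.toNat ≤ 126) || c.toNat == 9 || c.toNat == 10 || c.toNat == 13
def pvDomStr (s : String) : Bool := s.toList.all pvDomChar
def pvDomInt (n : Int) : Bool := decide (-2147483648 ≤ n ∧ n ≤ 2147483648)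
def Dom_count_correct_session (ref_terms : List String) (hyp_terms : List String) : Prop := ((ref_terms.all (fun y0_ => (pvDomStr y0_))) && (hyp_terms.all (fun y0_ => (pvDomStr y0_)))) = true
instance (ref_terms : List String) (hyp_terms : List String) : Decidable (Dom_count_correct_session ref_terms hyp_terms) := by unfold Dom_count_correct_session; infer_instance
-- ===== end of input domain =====

-- B replaces A's dedup-then-loop-with-branch counting by set intersection/difference cardinalities (simpler).
-- ===== PORT A =====
def count_correct_session (ref_terms : List String) (hyp_terms : List String) : List Int :=
  let refL : List String := PySem.Set.ofList ref_terms      -- ref_terms = list(set(ref_terms))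
  let hypL : List String := PySem.Set.ofList hyp_terms      -- hyp_terms = list(set(hyp_terms))
  -- for term in hyp_terms: if term in ref_terms: tp += 1 else: fp += 1
  -- (iterating a Python set: only the two order-independent COUNTS are consumed)
  let res : Int × Int := hypL.foldl
    (fun (acc : Int × Int) term =>
      if refL.contains term then (acc.1 + 1, acc.2) else (acc.1, acc.2 + 1))
    (0, 0)
  [res.1, res.2, (refL.length : Int)]

-- ===== PORT B =====
def count_correct_session_alt (ref_terms : List String) (hyp_terms : List String) : List Int :=
  let r : PySem.Set String := PySem.Set.ofList ref_terms
  let h : PySem.Set String := PySem.Set.ofList hyp_terms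
  [((PySem.Set.inter h r).length : Int), ((PySem.Set.diff h r).length : Int), (r.length : Int)]

-- ===== PRECONDITION & SPEC =====
def Spec_count_correct_session (ref_terms : List String) (hyp_terms : List String) (out : List Int) : Prop := out = count_correct_session_alt ref_terms hyp_terms
instance (ref_terms : List String) (hyp_terms : List String) (out : List Int) : Decidable (Spec_count_correct_session ref_terms hyp_terms out) := by unfold Spec_count_correct_session; infer_instance

-- ===== CLAIM (what is proved, stated in full; the proofs are below) =====
def Claim_equal_count_correct_session : Prop := ∀ (ref_terms : List String) (hyp_terms : List String), Dom_count_correct_session ref_terms hyp_terms → Spec_count_correct_session ref_terms hyp_terms (count_correct_session ref_terms hyp_terms)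

-- ===== LEMMAS AND PROOFS =====
-- A's counting loop computes, from any accumulator, the filtered lengths.
theorem pvFoldl_count (refL : List String) (l : List String) (a b : Int) :
    l.foldl (fun (acc : Int × Int) term =>
        if refL.contains term then (acc.1 + 1, acc.2) else (acc.1, acc.2 + 1)) (a, b)
    = (a + (l.filter (fun x => refL.contains x)).length,
       b + (l.filter (fun x => !refL.contains x)).length) := by
  induction l generalizing a b with
  | nil => simp
  | cons x xs ih =>
    rw [List.foldl_cons]
    by_cases hx : refL.contains x = true
    · rw [if_pos hx, ih]
      simp only [List.filter_cons, hx, Bool.not_true, if_true,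
        List.length_cons, Prod.mk.injEq]
      constructor <;> push_cast <;> ring
    · rw [if_neg hx, ih]
      simp only [List.filter_cons, hx, Bool.not_false, if_true,
        List.length_cons, Prod.mk.injEq]
      constructor <;> push_cast <;> ring

theorem pvInter_eq (s t : PySem.Set String) :
    PySem.Set.inter s t = s.filter (fun x => PySem.Set.contains t x) := by
  simp [PySem.Set.inter]

theorem pvDiff_eq (s t : PySem.Set String) :
    PySem.Set.diff s t = s.filter (fun x => !PySem.Set.contains t x) := by
  simp [PySem.Set.diff]

-- ===== VERDICT (by name: the statement is the Claim_ definition above) =====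
theorem count_correct_session_spec : Claim_equal_count_correct_session := by
  intro ref_terms hyp_terms _
  unfold Spec_count_correct_session count_correct_session count_correct_session_alt
  simp only [pvFoldl_count, pvInter_eq, pvDiff_eq, PySem.Set.contains_eq_listContains]
  simp
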